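-- pv_equiv track=rewrite | github.com/andrey-tashchyan/ResearchAssistant_Project | build_panel_parent_child.py | select_id_concepts
-- ===== SOURCE A (Python) =====
-- from typing import Dict, List, Optional, Set, Tuple
--
-- def select_id_concepts(concepts: List[str]) -> Dict[str, str]:
--     """
--     Détecte les 4 IDs conceptuels.
--     """
--     out: Dict[str, str] = {}
--     for c in concepts:
--         cl = c.lower()
--         if "family_id" in cl and "family_id" not in out:
--             out["family_id"] = c
--         elif "person_id" in cl and "person_id" not in out:
--             out["person_id"] = c
--         elif "mother_id" in cl and "mother_id" not in out:
--             out["mother_id"] = c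
--         elif "father_id" in cl and "father_id" not in out:
--             out["father_id"] = c
--     return out
-- ===== SOURCE B (Python) =====
-- from typing import Dict, List
--
-- def select_id_concepts(concepts: List[str]) -> Dict[str, str]:
--     """Staged per-keyword selection: for each keyword in priority order pick the
--     first not-yet-taken concept containing it, then emit the picks ordered by
--     concept position (which reproduces the single-pass insertion order)."""
--     def first_match(kw, taken):
--         for i, c in enumerate(concepts):
--             if i not in taken and kw in c.lower():
--                 return i, c
--         return None
--     winners = []
--     taken = []
--     for kw in ("family_id", "person_id", "mother_id", "father_id"):
--         hit = first_match(kw, taken)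
--         if hit is not None:
--             i, c = hit
--             winners.append((i, (kw, c)))
--             taken.append(i)
--     winners.sort(key=lambda t: t[0])
--     return dict(pair for _, pair in winners)
-- ===== Notes on version B (the rewrite author's own statement) =====
-- stated objective: alternative
-- what changed: Replaces A's single pass over concepts with a dict-membership-guarded elif chain by four staged per-keyword scans: for each keyword in priority order pick the first not-yet-taken concept containing it, then sort the picks by concept position to recover A's insertion order.
import Mathlib
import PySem

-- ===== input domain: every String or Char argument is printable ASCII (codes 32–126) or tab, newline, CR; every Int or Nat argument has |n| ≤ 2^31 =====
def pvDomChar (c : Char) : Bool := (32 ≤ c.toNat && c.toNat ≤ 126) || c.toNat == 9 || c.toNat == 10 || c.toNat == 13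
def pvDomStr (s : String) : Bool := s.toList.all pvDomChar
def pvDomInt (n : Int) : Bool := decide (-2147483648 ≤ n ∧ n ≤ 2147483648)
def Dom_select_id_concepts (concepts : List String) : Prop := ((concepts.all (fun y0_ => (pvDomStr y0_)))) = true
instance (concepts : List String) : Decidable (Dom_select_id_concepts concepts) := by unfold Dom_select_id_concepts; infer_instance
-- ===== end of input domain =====

-- B replaces A's single guarded pass over the concepts by four staged per-keyword scans
-- (first untaken matching concept per keyword) followed by a sort by concept position
-- (objective: alternative algorithm, same cost).

-- ===== PORT A =====
def pvStepA (out : PySem.Dict String String) (c : String) : PySem.Dict String String :=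
  let cl := PySem.Str.lower c
  if PySem.Str.isIn "family_id" cl && !out.contains "family_id" then out.insert "family_id" c
  else if PySem.Str.isIn "person_id" cl && !out.contains "person_id" then out.insert "person_id" c
  else if PySem.Str.isIn "mother_id" cl && !out.contains "mother_id" then out.insert "mother_id" c
  else if PySem.Str.isIn "father_id" cl && !out.contains "father_id" then out.insert "father_id" c
  else out

def select_id_concepts (concepts : List String) : List (String × String) :=
  (concepts.foldl pvStepA PySem.Dict.empty).items

-- ===== PORT B =====
def pvKeywords : List String := ["family_id", "person_id", "mother_id", "father_id"]

-- inner loop of Source B's first_match: first (index, concept) with index untaken and keyword contained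
def pvFirstMatch (kw : String) (taken : List Int) : List (Int × String) → Option (Int × String)
  | [] => none
  | (i, c) :: rest =>
    if !taken.contains i && PySem.Str.isIn kw (PySem.Str.lower c) then some (i, c)
    else pvFirstMatch kw taken rest

def select_id_concepts_alt (concepts : List String) : List (String × String) :=
  let E := PySem.List.enumerate concepts
  let acc := pvKeywords.foldl
    (fun (acc : List (Int × (String × String)) × List Int) kw =>
      match pvFirstMatch kw acc.2 E with
      | some (i, c) => (acc.1 ++ [(i, (kw, c))], acc.2 ++ [i])
      | none => acc) ([], [])
  let winners := PySem.List.sorted acc.1 (fun t => t.1) false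
  (PySem.Dict.ofList (winners.map Prod.snd)).items

-- ===== PRECONDITION & SPEC =====
def Spec_select_id_concepts (concepts : List String) (out : List (String × String)) : Prop := out = select_id_concepts_alt concepts
instance (concepts : List String) (out : List (String × String)) : Decidable (Spec_select_id_concepts concepts out) := by unfold Spec_select_id_concepts; infer_instance

-- ===== CLAIM (what is proved, stated in full; the proofs are below) =====
def Claim_equal_select_id_concepts : Prop := ∀ (concepts : List String), Dom_select_id_concepts concepts → Spec_select_id_concepts concepts (select_id_concepts concepts)

-- ===== LEMMAS AND PROOFS =====

-- proof-side description of A's pass: scan concepts, first remaining keyword matching wins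
def pvGo : List String → List String → List (String × String)
  | [], _ => []
  | c :: rest, remaining =>
    let cl := PySem.Str.lower c
    match remaining.find? (fun k => PySem.Str.isIn k cl) with
    | some k => (k, c) :: pvGo rest (remaining.filter (fun r => r ≠ k))
    | none => pvGo rest remaining

-- the same pass over an index-carrying list, keeping the winning index
def pvGoE : List (Int × String) → List String → List (Int × (String × String))
  | [], _ => []
  | (i, c) :: E, remaining =>
    match remaining.find? (fun k => PySem.Str.isIn k (PySem.Str.lower c)) with
    | some k => (i, (k, c)) :: pvGoE E (remaining.filter (fun r => r ≠ k))
    | none => pvGoE E remaining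

-- proof-side description of B's keyword loop
def pvStaged (E : List (Int × String)) : List String → List Int → List (Int × (String × String))
  | [], _ => []
  | kw :: rem, taken =>
    match pvFirstMatch kw taken E with
    | some (i, c) => (i, (kw, c)) :: pvStaged E rem (taken ++ [i])
    | none => pvStaged E rem taken

lemma pvStepA_nodup (out : PySem.Dict String String) (c : String)
    (h : out.keys.Nodup) : (pvStepA out c).keys.Nodup := by
  simp only [pvStepA]
  split_ifs <;> first
    | exact PySem.Dict.nodup_keys_insert _ _ _ h
    | exact h

-- keys produced by pvGo come from `remaining` and are distinct
lemma pvGo_keys (cs : List String) : ∀ (rem : List String), rem.Nodup →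
    ((pvGo cs rem).map Prod.fst).Nodup ∧ ∀ p ∈ pvGo cs rem, p.1 ∈ rem := by
  induction cs with
  | nil => intro rem _; simp [pvGo]
  | cons c cs ih =>
    intro rem hnd
    simp only [pvGo]
    cases hf : rem.find? (fun k => PySem.Str.isIn k (PySem.Str.lower c)) with
    | none => exact ih rem hnd
    | some k =>
      have hsub := ih (rem.filter (fun r => r ≠ k)) (hnd.filter _)
      refine ⟨?_, ?_⟩
      · simp only [List.map_cons, List.nodup_cons]
        refine ⟨fun hk => ?_, hsub.1⟩
        obtain ⟨p, hp, hp1⟩ := List.mem_map.mp hk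
        have := hsub.2 p hp
        rw [hp1] at this
        simp [List.mem_filter] at this
      · intro p hp
        rcases List.mem_cons.mp hp with rfl | hp
        · exact List.mem_of_find?_eq_some hf
        · exact List.mem_of_mem_filter (hsub.2 p hp)

-- invariant for A: the fold from any dict with distinct keys appends exactly pvGo's output
lemma pv_inv (cs : List String) : ∀ (out : PySem.Dict String String), out.keys.Nodup →
    (cs.foldl pvStepA out).items
      = out.items ++ pvGo cs (pvKeywords.filter (fun k => !out.contains k)) := by
  induction cs with
  | nil => intro out _; simp [pvGo]
  | cons c cs ih =>
    intro out hnd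
    rw [List.foldl_cons, ih _ (pvStepA_nodup out c hnd)]
    by_cases hb1 : out.contains "family_id" = true <;>
      by_cases hb2 : out.contains "person_id" = true <;>
        by_cases hb3 : out.contains "mother_id" = true <;>
          by_cases hb4 : out.contains "father_id" = true <;>
    by_cases ha1 : PySem.Chars.isIn ['f','a','m','i','l','y','_','i','d'] (PySem.Chars.lower c.toList) = true <;>
      by_cases ha2 : PySem.Chars.isIn ['p','e','r','s','o','n','_','i','d'] (PySem.Chars.lower c.toList) = true <;>
        by_cases ha3 : PySem.Chars.isIn ['m','o','t','h','e','r','_','i','d'] (PySem.Chars.lower c.toList) = true <;>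
          by_cases ha4 : PySem.Chars.isIn ['f','a','t','h','e','r','_','i','d'] (PySem.Chars.lower c.toList) = true <;>
    simp [pvStepA, pvGo, pvKeywords, List.filter, List.find?,
          ha1, ha2, ha3, ha4, hb1, hb2, hb3, hb4,
          PySem.Dict.contains_insert, PySem.Dict.items_insert_of_not_contains]

-- B's fold over the keyword list is pvStaged, and the taken list collects the winning indices
lemma pvFold_staged (E : List (Int × String)) :
    ∀ (rem : List String) (w : List (Int × (String × String))) (t : List Int),
    rem.foldl
      (fun (acc : List (Int × (String × String)) × List Int) kw =>
        match pvFirstMatch kw acc.2 E with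
        | some (i, c) => (acc.1 ++ [(i, (kw, c))], acc.2 ++ [i])
        | none => acc) (w, t)
      = (w ++ pvStaged E rem t, t ++ (pvStaged E rem t).map (fun p => p.1)) := by
  intro rem
  induction rem with
  | nil => intro w t; simp [pvStaged]
  | cons kw rem ih =>
    intro w t
    simp only [List.foldl_cons, pvStaged]
    cases h : pvFirstMatch kw t E with
    | some p =>
      obtain ⟨i, c⟩ := p
      simp only [ih, List.map_cons, List.append_assoc, List.cons_append, List.nil_append]
    | none => simp only [ih]

lemma pvFM_mem {kw : String} {t : List Int} {E : List (Int × String)} {p : Int × String}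
    (h : pvFirstMatch kw t E = some p) : p ∈ E := by
  induction E with
  | nil => simp [pvFirstMatch] at h
  | cons q E ih =>
    obtain ⟨i, c⟩ := q
    simp only [pvFirstMatch] at h
    split at h
    · cases h; exact List.mem_cons_self
    · exact List.mem_cons_of_mem _ (ih h)

-- pvFirstMatch only looks at taken-membership of indices occurring in E
lemma pvFM_congr (kw : String) (E : List (Int × String)) (t₁ t₂ : List Int)
    (h : ∀ p ∈ E, t₁.contains p.1 = t₂.contains p.1) :
    pvFirstMatch kw t₁ E = pvFirstMatch kw t₂ E := by
  induction E with
  | nil => rfl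
  | cons q E ih =>
    obtain ⟨i, c⟩ := q
    have hq := h (i, c) List.mem_cons_self
    simp only [pvFirstMatch, hq]
    split
    · rfl
    · exact ih (fun p hp => h p (List.mem_cons_of_mem _ hp))

lemma pvStaged_congr (E : List (Int × String)) : ∀ (rem : List String) (t₁ t₂ : List Int),
    (∀ p ∈ E, t₁.contains p.1 = t₂.contains p.1) →
    pvStaged E rem t₁ = pvStaged E rem t₂ := by
  intro rem
  induction rem with
  | nil => intro t₁ t₂ _; rfl
  | cons kw rem ih =>
    intro t₁ t₂ h
    simp only [pvStaged, pvFM_congr kw E t₁ t₂ h]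
    cases hm : pvFirstMatch kw t₂ E with
    | none => exact ih t₁ t₂ h
    | some p =>
      obtain ⟨i, c⟩ := p
      refine congrArg _ (ih (t₁ ++ [i]) (t₂ ++ [i]) ?_)
      intro q hq
      have hq2 := h q hq
      simp at hq2
      simp [hq2]

-- a head concept matching no remaining keyword can be dropped
lemma pvStaged_skip (i : Int) (c : String) (E : List (Int × String)) :
    ∀ (rem : List String) (t : List Int),
    (∀ k ∈ rem, PySem.Str.isIn k (PySem.Str.lower c) = false) →
    pvStaged ((i, c) :: E) rem t = pvStaged E rem t := by
  intro rem
  induction rem with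
  | nil => intro t _; rfl
  | cons kw rem ih =>
    intro t h
    have hkw := h kw List.mem_cons_self
    have hkw' : PySem.Chars.isIn kw.toList (PySem.Chars.lower c.toList) = false := by
      simpa using hkw
    have hcond : (!t.contains i && PySem.Str.isIn kw (PySem.Str.lower c)) = false := by
      simp [hkw']
    simp only [pvStaged, pvFirstMatch, hcond, Bool.false_eq_true, if_false]
    cases hm : pvFirstMatch kw t E with
    | none => exact ih t (fun k hk => h k (List.mem_cons_of_mem _ hk))
    | some p =>
      obtain ⟨i', c'⟩ := p
      exact congrArg _ (ih _ (fun k hk => h k (List.mem_cons_of_mem _ hk)))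

-- a head concept whose index is already taken can be dropped
lemma pvStaged_taken (i : Int) (c : String) (E : List (Int × String)) :
    ∀ (rem : List String) (t : List Int), i ∈ t →
    pvStaged ((i, c) :: E) rem t = pvStaged E rem t := by
  intro rem
  induction rem with
  | nil => intro t _; rfl
  | cons kw rem ih =>
    intro t ht
    have hc : t.contains i = true := by simpa using ht
    have hcond : (!t.contains i && PySem.Str.isIn kw (PySem.Str.lower c)) = false := by
      simp [ht]
    simp only [pvStaged, pvFirstMatch, hcond, Bool.false_eq_true, if_false]
    cases hm : pvFirstMatch kw t E with
    | none => exact ih t ht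
    | some p =>
      obtain ⟨i', c'⟩ := p
      exact congrArg _ (ih _ (by simp [ht]))

lemma pvStaged_nil : ∀ (rem : List String) (t : List Int), pvStaged [] rem t = [] := by
  intro rem
  induction rem with
  | nil => intro t; rfl
  | cons kw rem ih => intro t; simpa [pvStaged, pvFirstMatch] using ih t

-- key step: a matching head concept wins its first keyword, the rest is staged on the tail
lemma pvStaged_cons_match (i : Int) (c : String) (E : List (Int × String))
    (hiE : i ∉ E.map (fun p => p.1)) :
    ∀ (rem : List String) (t : List Int) (k : String), rem.Nodup →
    rem.find? (fun k => PySem.Str.isIn k (PySem.Str.lower c)) = some k →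
    i ∉ t →
    (pvStaged ((i, c) :: E) rem t).Perm
      ((i, (k, c)) :: pvStaged E (rem.filter (fun r => r ≠ k)) t) := by
  intro rem
  induction rem with
  | nil => intro t k _ hf _; simp at hf
  | cons kw rem ih =>
    intro t k hnd hf hit
    by_cases hkw : PySem.Str.isIn kw (PySem.Str.lower c) = true
    · rw [List.find?_cons_of_pos (p := fun k => PySem.Str.isIn k (PySem.Str.lower c)) (by simpa using hkw)] at hf
      cases hf
      have hkwC : PySem.Chars.isIn kw.toList (PySem.Chars.lower c.toList) = true := by
        simpa using hkw
      have hcond : (!t.contains i && PySem.Str.isIn kw (PySem.Str.lower c)) = true := by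
        simp [hkwC, hit]
      have hfilter : (kw :: rem).filter (fun r => r ≠ kw) = rem := by
        have hnotmem : kw ∉ rem := (List.nodup_cons.mp hnd).1
        simp only [List.filter_cons, ne_eq, not_true_eq_false, decide_false]
        exact List.filter_eq_self.mpr (fun x hx => by
          simp only [decide_eq_true_eq]
          exact fun hxe => hnotmem (hxe ▸ hx))
      rw [hfilter]
      simp only [pvStaged, pvFirstMatch, hcond, if_true]
      rw [pvStaged_taken i c E rem (t ++ [i]) (by simp)]
      rw [pvStaged_congr E rem (t ++ [i]) t (by
        intro p hp
        have : p.1 ≠ i := fun he => hiE (he ▸ List.mem_map_of_mem hp)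
        simp [this])]
    · have hkw' : PySem.Str.isIn kw (PySem.Str.lower c) = false := by
        simpa using hkw
      rw [List.find?_cons_of_neg (p := fun k => PySem.Str.isIn k (PySem.Str.lower c)) (by simpa using hkw)] at hf
      have hpk : PySem.Str.isIn k (PySem.Str.lower c) = true := by
        simpa using List.find?_some hf
      have hkne : kw ≠ k := fun he => by rw [he, hpk] at hkw'; cases hkw'
      have hfilter : (kw :: rem).filter (fun r => r ≠ k) = kw :: rem.filter (fun r => r ≠ k) := by
        simp [hkne]
      rw [hfilter]
      have hkwA : PySem.Chars.isIn kw.toList (PySem.Chars.lower c.toList) = false := by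
        simpa using hkw'
      have hcond : (!t.contains i && PySem.Str.isIn kw (PySem.Str.lower c)) = false := by
        simp [hkwA]
      cases hm : pvFirstMatch kw t E with
      | none =>
        simp only [pvStaged, pvFirstMatch, hcond, Bool.false_eq_true, if_false, hm]
        exact ih t k (List.nodup_cons.mp hnd).2 hf hit
      | some p =>
        obtain ⟨j, c'⟩ := p
        have hji : j ≠ i := by
          intro he
          exact hiE (he ▸ List.mem_map_of_mem (pvFM_mem hm))
        simp only [pvStaged, pvFirstMatch, hcond, Bool.false_eq_true, if_false, hm]
        have hIH := ih (t ++ [j]) k (List.nodup_cons.mp hnd).2 hf (by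
          intro hmem
          rcases List.mem_append.mp hmem with h | h
          · exact hit h
          · exact hji (List.mem_singleton.mp h).symm)
        refine (hIH.cons (j, (kw, c'))).trans ?_
        exact List.Perm.swap _ _ _

-- the staged per-keyword pass is a permutation of the per-concept pass
lemma pvStaged_perm_goE : ∀ (E : List (Int × String)) (rem : List String) (t : List Int),
    (E.map (fun p => p.1)).Nodup → rem.Nodup → (∀ p ∈ E, p.1 ∉ t) →
    (pvStaged E rem t).Perm (pvGoE E rem) := by
  intro E
  induction E with
  | nil => intro rem t _ _ _; rw [pvStaged_nil]; exact List.Perm.refl _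
  | cons q E ih =>
    obtain ⟨i, c⟩ := q
    intro rem t hnd hremnd ht
    rw [List.map_cons] at hnd
    have hiE : i ∉ E.map (fun p => p.1) := (List.nodup_cons.mp hnd).1
    have hndE : (E.map (fun p => p.1)).Nodup := (List.nodup_cons.mp hnd).2
    cases hf : rem.find? (fun k => PySem.Str.isIn k (PySem.Str.lower c)) with
    | none =>
      have hall : ∀ k ∈ rem, PySem.Str.isIn k (PySem.Str.lower c) = false := by
        intro k hk
        simpa using List.find?_eq_none.mp hf k hk
      rw [pvStaged_skip i c E rem t hall]
      simp only [pvGoE, hf]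
      exact ih rem t hndE hremnd (fun p hp => ht p (List.mem_cons_of_mem _ hp))
    | some k =>
      have h1 := pvStaged_cons_match i c E hiE rem t k hremnd hf
        (ht (i, c) List.mem_cons_self)
      refine h1.trans ?_
      simp only [pvGoE, hf]
      exact List.Perm.cons _ (ih (rem.filter (fun r => r ≠ k)) t hndE (hremnd.filter _)
        (fun p hp => ht p (List.mem_cons_of_mem _ hp)))

lemma pvGoE_subset (E : List (Int × String)) : ∀ (rem : List String) (p : Int × (String × String)),
    p ∈ pvGoE E rem → p.1 ∈ E.map (fun q => q.1) := by
  intro rem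
  induction E generalizing rem with
  | nil => intro p hp; simp [pvGoE] at hp
  | cons q E ih =>
    obtain ⟨i, c⟩ := q
    intro p hp
    simp only [pvGoE] at hp
    split at hp
    · rcases List.mem_cons.mp hp with rfl | hp
      · simp
      · exact List.mem_cons_of_mem _ (ih _ p hp)
    · exact List.mem_cons_of_mem _ (ih _ p hp)

lemma pvGoE_pairwise (E : List (Int × String)) : ∀ (rem : List String),
    (E.Pairwise (fun p q => p.1 < q.1)) →
    (pvGoE E rem).Pairwise (fun a b => a.1 < b.1) := by
  intro rem
  induction E generalizing rem with
  | nil => intro _; simp [pvGoE]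
  | cons q E ih =>
    obtain ⟨i, c⟩ := q
    intro hpw
    simp only [pvGoE]
    split
    · refine List.Pairwise.cons ?_ (ih _ (hpw.sublist (List.sublist_cons_self _ _)))
      intro b hb
      have hb1 := pvGoE_subset E _ b hb
      obtain ⟨q, hq, hq1⟩ := List.mem_map.mp hb1
      have := (List.pairwise_cons.mp hpw).1 q hq
      simpa [← hq1] using this
    · exact ih _ (hpw.sublist (List.sublist_cons_self _ _))

lemma pvGoE_map_snd (E : List (Int × String)) : ∀ (rem : List String),
    pvGo (E.map Prod.snd) rem = (pvGoE E rem).map Prod.snd := by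
  intro rem
  induction E generalizing rem with
  | nil => rfl
  | cons q E ih =>
    obtain ⟨i, c⟩ := q
    simp only [List.map_cons, pvGo, pvGoE]
    split
    · simp [ih]
    · exact ih _

-- ===== VERDICT (by name: the statement is the Claim_ definition above) =====
theorem select_id_concepts_spec : Claim_equal_select_id_concepts := by
  intro concepts _
  show select_id_concepts concepts = select_id_concepts_alt concepts
  -- A's side: the fold is pvGo on all four keywords
  have hinv := pv_inv concepts PySem.Dict.empty (by simp)
  have hrem : pvKeywords.filter (fun k => !(PySem.Dict.empty : PySem.Dict String String).contains k) = pvKeywords := by decide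
  rw [hrem] at hinv
  rw [show (PySem.Dict.empty : PySem.Dict String String).items = [] from rfl, List.nil_append] at hinv
  -- B's side
  set E := PySem.List.enumerate concepts with hE
  have hEpw : E.Pairwise (fun p q => p.1 < q.1) := PySem.List.pairwise_lt_enumerate concepts 0
  have hEnd : (E.map (fun p => p.1)).Nodup := by
    rw [List.nodup_iff_pairwise_ne, List.pairwise_map]
    exact hEpw.imp (fun h => ne_of_lt h)
  have hperm : (pvStaged E pvKeywords []).Perm (pvGoE E pvKeywords) :=
    pvStaged_perm_goE E pvKeywords [] hEnd (by decide) (by simp)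
  have hpw : (pvGoE E pvKeywords).Pairwise (fun a b => a.1 < b.1) :=
    pvGoE_pairwise E pvKeywords hEpw
  have hsort : PySem.List.sorted (pvStaged E pvKeywords []) (fun t => t.1) false = pvGoE E pvKeywords :=
    PySem.List.sorted_eq_of_perm_of_pairwise_lt _ _ (fun t => t.1) hperm.symm hpw
  have hmap : (pvGoE E pvKeywords).map Prod.snd = pvGo concepts pvKeywords := by
    have := pvGoE_map_snd E pvKeywords
    rw [hE, PySem.List.map_snd_enumerate] at this
    exact this.symm
  have hnd : ((pvGo concepts pvKeywords).map Prod.fst).Nodup :=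
    (pvGo_keys concepts pvKeywords (by decide)).1
  have hof : (PySem.Dict.ofList (pvGo concepts pvKeywords)).items = pvGo concepts pvKeywords := by
    have := PySem.Dict.items_foldl_insert_fresh (l := pvGo concepts pvKeywords)
      (k := Prod.fst) (v := Prod.snd) (d := PySem.Dict.empty) (by simp) hnd
    simpa [PySem.Dict.ofList, PySem.Dict.update] using this
  simp only [select_id_concepts, select_id_concepts_alt]
  rw [pvFold_staged E pvKeywords [] []]
  simp only [List.nil_append, hsort, hmap, hof, hinv]
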